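-- pv_equiv track=rewrite | github.com/SarpinskayaAnastasia/mephi-laboratories | 2 semester/lab9-PROJECT/tools.py | check_isbn
-- ===== SOURCE A (Python) =====
-- def check_isbn(isbn: str) -> bool:
--     isbn = isbn.strip()
--     if isbn.upper().startswith("ISBN"):
--         isbn = isbn[4:].lstrip()
--
--     parts = isbn.split("-")
--     if len(parts) != 5 or not all(part.isdigit() for part in parts):
--         return False
--
--     digits_str = ''.join(parts)
--     if len(digits_str) != 13:
--         return False
--
--     digits = list(map(int, digits_str[:12]))
--     check_digit = int(digits_str[12])
--     s = sum(d * (3 if i % 2 else 1) for i, d in enumerate(digits))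
--     return check_digit == (10 - s % 10) % 10
-- ===== SOURCE B (Python) =====
-- def check_isbn(isbn: str) -> bool:
--     s = isbn.strip()
--     if len(s) >= 4 and s[0] in "Ii" and s[1] in "Ss" and s[2] in "Bb" and s[3] in "Nn":
--         s = s[4:].lstrip()
--
--     # one character-level state machine over s: no split, no join, no slicing.
--     groups = 1       # hyphen-separated groups seen so far
--     ndigits = 0      # digits consumed so far (global position)
--     total = 0        # running weighted checksum over all digits
--     empty = True     # current group has no character yet
--     for c in s:
--         if c == '-':
--             if empty:
--                 return False
--             groups += 1
--             empty = True
--         elif '0' <= c <= '9':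
--             total += (ord(c) - 48) * (3 if ndigits % 2 else 1)
--             ndigits += 1
--             empty = False
--         else:
--             return False
--     return (not empty) and groups == 5 and ndigits == 13 and total % 10 == 0
-- ===== Notes on version B (the rewrite author's own statement) =====
-- stated objective: alternative
-- what changed: Replaces A's staged pipeline (split on '-', per-part isdigit scans, join, slice, enumerate, derived check digit comparison) by a single character-level state machine that walks the string once, tracking group count, an empty-group flag, global digit position and a running weighted checksum, and finally tests divisibility by 10; the case-insensitive ISBN prefix is detected by direct character comparison instead of uppercasing the whole string.
import Mathlib
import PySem

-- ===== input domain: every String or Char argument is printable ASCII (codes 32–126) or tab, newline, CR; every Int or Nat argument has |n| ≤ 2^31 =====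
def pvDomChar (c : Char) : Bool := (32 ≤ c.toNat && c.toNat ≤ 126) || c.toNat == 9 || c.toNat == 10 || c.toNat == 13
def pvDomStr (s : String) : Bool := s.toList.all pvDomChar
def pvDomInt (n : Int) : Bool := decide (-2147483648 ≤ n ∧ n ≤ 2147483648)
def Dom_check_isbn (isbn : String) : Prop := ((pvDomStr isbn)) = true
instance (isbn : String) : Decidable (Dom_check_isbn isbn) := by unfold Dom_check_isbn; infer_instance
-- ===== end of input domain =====

-- B replaces A's staged split/join/slice/enumerate pipeline by a single character-level
-- state machine over the string and tests the checksum by divisibility (objective: alternative).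

-- int(c) for a single digit character c (A reaches it only behind the isdigit guard, where
-- ord(c) - 48 is exact)
def pvDigitVal (c : Char) : Int := (c.toNat : Int) - 48

-- ===== PORT A =====
def check_isbn (isbn : String) : Bool :=
  let s0 := PySem.Chars.strip isbn.toList
  let s := if PySem.Chars.startswith (PySem.Chars.upper s0) "ISBN".toList then
             PySem.Chars.lstrip (PySem.List.slice s0 (some 4) none)
           else s0
  let parts := PySem.Chars.splitOn s ['-']
  if parts.length ≠ 5 ∨ parts.all PySem.Chars.strIsdigit = false then false
  else
    let digits_str := PySem.Chars.join [] parts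
    if digits_str.length ≠ 13 then false
    else
      let digits := (PySem.List.slice digits_str none (some 12)).map pvDigitVal
      -- digits_str[12]: in range because of the length-13 guard just above
      let check_digit := pvDigitVal (PySem.List.pyGetD digits_str 12 '0')
      let sm := (PySem.List.enumerate digits).foldl
        (fun acc p => acc + p.2 * (if PySem.Int.mod p.1 2 ≠ 0 then 3 else 1)) 0
      decide (check_digit = PySem.Int.mod (10 - PySem.Int.mod sm 10) 10)

-- ===== PORT B =====
-- the for-loop of Source B: state (groups, ndigits, total, empty); early `return False`
-- becomes the literal `false` result
def pvScan : List Char → Int → Int → Int → Bool → Bool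
  | [], groups, ndigits, total, empty =>
      !empty && (decide (groups = 5) && (decide (ndigits = 13) &&
        decide (PySem.Int.mod total 10 = 0)))
  | c :: cs, groups, ndigits, total, empty =>
      if c = '-' then
        if empty then false else pvScan cs (groups + 1) ndigits total true
      else if '0' ≤ c ∧ c ≤ '9' then
        pvScan cs groups (ndigits + 1)
          (total + ((c.toNat : Int) - 48) * (if PySem.Int.mod ndigits 2 ≠ 0 then 3 else 1)) false
      else false

def check_isbn_alt (isbn : String) : Bool :=
  let s0 := PySem.Chars.strip isbn.toList
  -- len(s) >= 4 and s[0] in "Ii" and s[1] in "Ss" and s[2] in "Bb" and s[3] in "Nn"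
  let s := if 4 ≤ (s0.length : Int)
              ∧ PySem.List.pyGetD s0 0 ' ' ∈ ['I', 'i']
              ∧ PySem.List.pyGetD s0 1 ' ' ∈ ['S', 's']
              ∧ PySem.List.pyGetD s0 2 ' ' ∈ ['B', 'b']
              ∧ PySem.List.pyGetD s0 3 ' ' ∈ ['N', 'n']
           then PySem.Chars.lstrip (PySem.List.slice s0 (some 4) none)
           else s0
  pvScan s 1 0 0 true

-- ===== PRECONDITION & SPEC =====
def Spec_check_isbn (isbn : String) (out : Bool) : Prop := out = check_isbn_alt isbn
instance (isbn : String) (out : Bool) : Decidable (Spec_check_isbn isbn out) := by unfold Spec_check_isbn; infer_instance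

-- ===== CLAIM (what is proved, stated in full; the proofs are below) =====
def Claim_equal_check_isbn : Prop := ∀ (isbn : String), Dom_check_isbn isbn → Spec_check_isbn isbn (check_isbn isbn)

-- ===== LEMMAS AND PROOFS =====

-- Char arithmetic ------------------------------------------------------------
theorem pvToNat_ofNat (n : Nat) (h : n < 55296) : (Char.ofNat n).toNat = n := by
  unfold Char.ofNat
  rw [dif_pos (by unfold Nat.isValidChar; omega)]
  simp [Char.toNat, Char.ofNatAux]

theorem pvChar_eq_iff_toNat (c d : Char) : (c = d) ↔ (c.toNat = d.toNat) := by
  constructor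
  · intro h; rw [h]
  · intro h; exact Char.ext (UInt32.toNat_inj.mp h)

theorem pvChar_le_iff_toNat (c d : Char) : (c ≤ d) ↔ (c.toNat ≤ d.toNat) := by
  rw [Char.le_def, UInt32.le_iff_toNat_le]; rfl

theorem pvUpper_mem (c U L : Char) (hUL : U.toNat + 32 = L.toNat)
    (hU : 65 ≤ U.toNat ∧ U.toNat ≤ 90) :
    (PySem.Chars.upperChar c = U) ↔ (c = U ∨ c = L) := by
  unfold PySem.Chars.upperChar PySem.Chars.islower
  have ha : ('a':Char).toNat = 97 := by decide
  have hz : ('z':Char).toNat = 122 := by decide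
  split_ifs with h
  · simp only [Bool.and_eq_true, decide_eq_true_eq, pvChar_le_iff_toNat, ha, hz] at h
    rw [pvChar_eq_iff_toNat, pvChar_eq_iff_toNat c U, pvChar_eq_iff_toNat c L,
      pvToNat_ofNat _ (by omega)]
    omega
  · simp only [Bool.and_eq_true, decide_eq_true_eq, pvChar_le_iff_toNat, ha, hz,
      not_and_or, not_le] at h
    rw [pvChar_eq_iff_toNat c U, pvChar_eq_iff_toNat c L]
    omega

-- A's prefix test equals B's character-wise test ------------------------------
theorem pvPrefix_eq (l : List Char) :
    (PySem.Chars.startswith (PySem.Chars.upper l) "ISBN".toList = true)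
      ↔ (4 ≤ (l.length : Int)
          ∧ PySem.List.pyGetD l 0 ' ' ∈ ['I', 'i']
          ∧ PySem.List.pyGetD l 1 ' ' ∈ ['S', 's']
          ∧ PySem.List.pyGetD l 2 ' ' ∈ ['B', 'b']
          ∧ PySem.List.pyGetD l 3 ' ' ∈ ['N', 'n']) := by
  match l with
  | [] | [_] | [_, _] | [_, _, _] =>
    simp [PySem.Chars.startswith, PySem.Chars.upper, List.isPrefixOf]
  | a :: b :: c :: d :: rest =>
    have hs : "ISBN".toList = ['I', 'S', 'B', 'N'] := by decide
    have g0 : PySem.List.pyGetD (a :: b :: c :: d :: rest) 0 ' ' = a := by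
      simp only [PySem.List.pyGetD, PySem.List.pyGet?, PySem.List.pyIdx?]
      split_ifs with h1 h2 <;> simp_all
      omega
    have g1 : PySem.List.pyGetD (a :: b :: c :: d :: rest) 1 ' ' = b := by
      simp only [PySem.List.pyGetD, PySem.List.pyGet?, PySem.List.pyIdx?]
      split_ifs with h1 h2 <;> simp_all
      omega
    have g2 : PySem.List.pyGetD (a :: b :: c :: d :: rest) 2 ' ' = c := by
      simp only [PySem.List.pyGetD, PySem.List.pyGet?, PySem.List.pyIdx?]
      split_ifs with h1 h2 <;> simp_all
      omega
    have g3 : PySem.List.pyGetD (a :: b :: c :: d :: rest) 3 ' ' = d := by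
      simp only [PySem.List.pyGetD, PySem.List.pyGet?, PySem.List.pyIdx?]
      split_ifs with h1 h2 <;> simp_all
      omega
    rw [g0, g1, g2, g3]
    have e1 := pvUpper_mem a 'I' 'i' (by decide) (by decide)
    have e2 := pvUpper_mem b 'S' 's' (by decide) (by decide)
    have e3 := pvUpper_mem c 'B' 'b' (by decide) (by decide)
    have e4 := pvUpper_mem d 'N' 'n' (by decide) (by decide)
    simp only [PySem.Chars.startswith, PySem.Chars.upper, hs, List.map_cons, List.isPrefixOf,
      Bool.and_true, Bool.and_eq_true, beq_iff_eq,
      List.length_cons, List.mem_cons, List.not_mem_nil, or_false]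
    constructor
    · rintro ⟨h1, h2, h3, h4⟩
      exact ⟨by push_cast; omega, e1.mp h1.symm, e2.mp h2.symm, e3.mp h3.symm, e4.mp h4.symm⟩
    · rintro ⟨-, h1, h2, h3, h4⟩
      exact ⟨(e1.mpr h1).symm, (e2.mpr h2).symm, (e3.mpr h3).symm, (e4.mpr h4).symm⟩

-- splitOn with a single-character separator, in simple recursive form ---------
def pvSos : List Char → List (List Char)
  | [] => [[]]
  | c :: cs => if c = '-' then [] :: pvSos cs else (pvSos cs).modifyHead (c :: ·)

theorem pvGo_spec (l : List Char) : ∀ (fuel : Nat) (cur : List Char) (acc : List (List Char)),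
    l.length < fuel →
    PySem.Chars.splitOn.go ['-'] fuel l cur acc
      = acc.reverse ++ (pvSos l).modifyHead (cur.reverse ++ ·) := by
  induction l with
  | nil =>
    intro fuel cur acc h
    match fuel with
    | f + 1 => simp [PySem.Chars.splitOn.go, pvSos]
  | cons c rest ih =>
    intro fuel cur acc h
    match fuel with
    | f + 1 =>
      rw [PySem.Chars.splitOn.go]
      by_cases hc : c = '-'
      · subst hc
        simp only [List.isPrefixOf, Bool.and_true, beq_self_eq_true, if_pos,
          List.length_cons, List.length_nil, List.drop_succ_cons, List.drop_zero]
        rw [ih f [] (cur.reverse :: acc) (by simpa using Nat.lt_of_succ_lt_succ h)]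
        simp [pvSos]
        cases pvSos rest <;> simp
      · have hpre : List.isPrefixOf ['-'] (c :: rest) = false := by
          simp [List.isPrefixOf]
          exact fun hh => absurd hh.symm hc
        rw [hpre]
        simp only [Bool.false_eq_true, if_false]
        rw [ih f (c :: cur) acc (by simpa using Nat.lt_of_succ_lt_succ h)]
        simp only [pvSos, if_neg hc]
        cases pvSos rest <;> simp

theorem pvSplitOn_eq_sos (l : List Char) : PySem.Chars.splitOn l ['-'] = pvSos l := by
  rw [PySem.Chars.splitOn, pvGo_spec l (l.length + 1) [] [] (Nat.lt_succ_self _)]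
  cases pvSos l <;> simp

-- weighted sum of the digit values of l, weights alternating 1/3 from position k
def pvWsum : List Char → Int → Int
  | [], _ => 0
  | c :: cs, k => pvDigitVal c * (if PySem.Int.mod k 2 ≠ 0 then 3 else 1) + pvWsum cs (k + 1)

-- the common normal form both ports are reduced to
def pvC : List (List Char) → Int → Int → Int → Bool → Bool
  | [], _, _, _, _ => false
  | p :: ps, g, nd, tot, e =>
      p.all PySem.Chars.isdigit &&
      (decide (p ≠ [] ∨ e = false) &&
      (ps.all PySem.Chars.strIsdigit &&
      (decide (g + (1 + (ps.length : Int)) = 6) &&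
      (decide (nd + (((p :: ps).flatten.length) : Int) = 13) &&
      decide (PySem.Int.mod (tot + pvWsum (p :: ps).flatten nd) 10 = 0)))))

theorem pvSos_ne_nil (l : List Char) : pvSos l ≠ [] := by
  induction l with
  | nil => simp [pvSos]
  | cons c cs ih =>
    simp only [pvSos]
    split_ifs
    · simp
    · cases h : pvSos cs with
      | nil => exact absurd h ih
      | cons q qs => simp [List.modifyHead]

theorem pvC_cons_nil (q : List Char) (qs : List (List Char)) (g nd tot : Int) :
    pvC ([] :: q :: qs) g nd tot false = pvC (q :: qs) (g + 1) nd tot true := by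
  rw [Bool.eq_iff_iff]
  simp only [pvC, PySem.Chars.strIsdigit, List.all_cons, List.flatten_cons, List.nil_append,
    Bool.and_eq_true, decide_eq_true_eq, List.all_nil, true_and,
    ne_eq, or_true, Bool.not_eq_eq_eq_not, Bool.not_true, List.length_cons,
    List.isEmpty_eq_false_iff]
  constructor
  · rintro ⟨⟨⟨hne, hq⟩, hqs⟩, hg, rest⟩
    exact ⟨hq, Or.inl hne, hqs, by push_cast at hg ⊢; omega, rest⟩
  · rintro ⟨hq, hne, hqs, hg, rest⟩
    refine ⟨⟨⟨?_, hq⟩, hqs⟩, by push_cast at hg ⊢; omega, rest⟩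
    rcases hne with h | h
    · exact h
    · simp at h

theorem pvC_cons_digit (c : Char) (q : List Char) (qs : List (List Char)) (g nd tot : Int)
    (e : Bool) (hd : PySem.Chars.isdigit c = true) :
    pvC ((c :: q) :: qs) g nd tot e
      = pvC (q :: qs) g (nd + 1)
          (tot + pvDigitVal c * (if PySem.Int.mod nd 2 ≠ 0 then 3 else 1)) false := by
  rw [Bool.eq_iff_iff]
  simp only [pvC, List.all_cons, hd, true_and, List.flatten_cons, List.cons_append,
    Bool.and_eq_true, decide_eq_true_eq, ne_eq, reduceCtorEq, not_false_eq_true, true_or,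
    or_true, List.length_cons, pvWsum]
  rw [show tot + ((pvDigitVal c * if ¬PySem.Int.mod nd 2 = 0 then 3 else 1)
        + pvWsum (q ++ qs.flatten) (nd + 1))
      = (tot + pvDigitVal c * if ¬PySem.Int.mod nd 2 = 0 then 3 else 1)
        + pvWsum (q ++ qs.flatten) (nd + 1) by ring]
  constructor
  · rintro ⟨h1, h2, h3, h4, h5⟩
    exact ⟨h1, h2, h3, by push_cast at h4 ⊢; omega, h5⟩
  · rintro ⟨h1, h2, h3, h4, h5⟩
    exact ⟨h1, h2, h3, by push_cast at h4 ⊢; omega, h5⟩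

theorem pvScan_eq_C (s : List Char) : ∀ (g nd tot : Int) (e : Bool),
    pvScan s g nd tot e = pvC (pvSos s) g nd tot e := by
  induction s with
  | nil =>
    intro g nd tot e
    rw [Bool.eq_iff_iff]
    simp only [pvScan, pvSos, pvC, List.all_nil, List.flatten_cons, List.flatten_nil,
      List.nil_append, List.length_nil, pvWsum, Bool.and_eq_true, decide_eq_true_eq,
      Bool.not_eq_eq_eq_not, Bool.not_true, true_and, ne_eq, add_zero]
    constructor
    · rintro ⟨he, hg, hnd, hm⟩
      exact ⟨Or.inr he, by omega, by push_cast; omega, hm⟩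
    · rintro ⟨he, hg, hnd, hm⟩
      refine ⟨?_, by omega, by push_cast at hnd; omega, hm⟩
      simpa using he
  | cons c cs ih =>
    intro g nd tot e
    by_cases hc : c = '-'
    · subst hc
      rw [show pvSos ('-' :: cs) = [] :: pvSos cs by simp [pvSos]]
      cases e with
      | true =>
        rw [show pvScan ('-' :: cs) g nd tot true = false by simp [pvScan]]
        cases h : pvSos cs with
        | nil => exact absurd h (pvSos_ne_nil cs)
        | cons q qs => simp [pvC]
      | false =>
        rw [show pvScan ('-' :: cs) g nd tot false = pvScan cs (g + 1) nd tot true by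
          simp [pvScan]]
        rw [ih]
        cases h : pvSos cs with
        | nil => exact absurd h (pvSos_ne_nil cs)
        | cons q qs => rw [pvC_cons_nil]
    · by_cases hd : '0' ≤ c ∧ c ≤ '9'
      · rw [show pvScan (c :: cs) g nd tot e = pvScan cs g (nd + 1)
            (tot + ((c.toNat : Int) - 48) * (if PySem.Int.mod nd 2 ≠ 0 then 3 else 1)) false by
          simp [pvScan, hc, hd]]
        rw [show pvSos (c :: cs) = (pvSos cs).modifyHead (c :: ·) by simp [pvSos, hc]]
        rw [ih]
        cases h : pvSos cs with
        | nil => exact absurd h (pvSos_ne_nil cs)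
        | cons q qs =>
          rw [List.modifyHead_cons,
            pvC_cons_digit c q qs g nd tot e (by simp [PySem.Chars.isdigit, hd.1, hd.2])]
          rfl
      · rw [show pvScan (c :: cs) g nd tot e = false by simp [pvScan, hc, hd]]
        rw [show pvSos (c :: cs) = (pvSos cs).modifyHead (c :: ·) by simp [pvSos, hc]]
        cases h : pvSos cs with
        | nil => exact absurd h (pvSos_ne_nil cs)
        | cons q qs =>
          rw [List.modifyHead_cons]
          have hcd : PySem.Chars.isdigit c = false := by
            simp only [PySem.Chars.isdigit, Bool.and_eq_false_iff, decide_eq_false_iff_not]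
            by_cases h0 : '0' ≤ c
            · exact Or.inr (fun h9 => hd ⟨h0, h9⟩)
            · exact Or.inl h0
          simp [pvC, hcd]

theorem pvWsum_append (l₁ l₂ : List Char) (k : Int) :
    pvWsum (l₁ ++ l₂) k = pvWsum l₁ k + pvWsum l₂ (k + l₁.length) := by
  induction l₁ generalizing k with
  | nil => simp [pvWsum]
  | cons c cs ih => simp only [List.cons_append, pvWsum, ih (k + 1), List.length_cons]; push_cast; ring_nf

theorem pvJoin_nil_eq_flatten (parts : List (List Char)) :
    PySem.Chars.join [] parts = parts.flatten := by
  induction parts with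
  | nil => simp [PySem.Chars.join_nil]
  | cons p ps ih =>
    cases ps with
    | nil => simp [PySem.Chars.join_singleton]
    | cons q rest => simp [PySem.Chars.join_cons_cons] at ih ⊢; simp [ih]

theorem pvAFold (cs : List Char) (k a : Int) :
    (PySem.List.enumerate (cs.map pvDigitVal) k).foldl
        (fun acc p => acc + p.2 * (if PySem.Int.mod p.1 2 ≠ 0 then 3 else 1)) a
      = a + pvWsum cs k := by
  induction cs generalizing k a with
  | nil => rw [List.map_nil, PySem.List.enumerate]; simp [pvWsum]
  | cons c cs ih =>
    rw [List.map_cons, PySem.List.enumerate]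
    simp only [List.foldl_cons, ih (k + 1), pvWsum]
    ring_nf

theorem pvDigit_bounds (c : Char) (h : PySem.Chars.isdigit c = true) :
    0 ≤ pvDigitVal c ∧ pvDigitVal c ≤ 9 := by
  simp [PySem.Chars.isdigit] at h
  obtain ⟨h1, h2⟩ := h
  rw [Char.le_def, UInt32.le_iff_toNat_le] at h1 h2
  have h0 : ('0' : Char).val.toNat = 48 := by decide
  have h9 : ('9' : Char).val.toNat = 57 := by decide
  have hc : c.toNat = c.val.toNat := rfl
  unfold pvDigitVal
  omega

theorem pvWsum_nonneg (l : List Char) (k : Int) (h : ∀ c ∈ l, PySem.Chars.isdigit c = true) :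
    0 ≤ pvWsum l k := by
  induction l generalizing k with
  | nil => simp [pvWsum]
  | cons c cs ih =>
    have hc := (pvDigit_bounds c (h c (by simp))).1
    have := ih (k + 1) (fun d hd => h d (by simp [hd]))
    simp only [pvWsum]
    have : (0:Int) ≤ pvDigitVal c * (if PySem.Int.mod k 2 ≠ 0 then 3 else 1) := by
      split <;> positivity
    omega

theorem pvA_eq_C (parts : List (List Char)) :
    (if parts.length ≠ 5 ∨ parts.all PySem.Chars.strIsdigit = false then false
     else
       let digits_str := PySem.Chars.join [] parts
       if digits_str.length ≠ 13 then false
       else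
         let digits := (PySem.List.slice digits_str none (some 12)).map pvDigitVal
         let check_digit := pvDigitVal (PySem.List.pyGetD digits_str 12 '0')
         let sm := (PySem.List.enumerate digits).foldl
           (fun acc p => acc + p.2 * (if PySem.Int.mod p.1 2 ≠ 0 then 3 else 1)) 0
         decide (check_digit = PySem.Int.mod (10 - PySem.Int.mod sm 10) 10))
    = pvC parts 1 0 0 true := by
  cases parts with
  | nil => simp [pvC]
  | cons p ps =>
    by_cases hg : (p :: ps).length ≠ 5 ∨ (p :: ps).all PySem.Chars.strIsdigit = false
    · rw [if_pos hg]
      symm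
      rw [Bool.eq_false_iff]
      intro hT
      simp only [pvC, Bool.and_eq_true, decide_eq_true_eq] at hT
      obtain ⟨hpd, hpe, hqs, hgl, -, -⟩ := hT
      rcases hg with hlen | hall
      · simp only [List.length_cons] at hlen
        omega
      · simp only [List.all_cons, Bool.and_eq_false_iff] at hall
        rcases hall with h | h
        · simp only [PySem.Chars.strIsdigit, Bool.and_eq_false_iff, Bool.not_eq_false',
            List.isEmpty_iff] at h
          rcases h with h | h
          · rcases hpe with h' | h'
            · exact h' h
            · simp at h'
          · rw [hpd] at h; simp at h
        · rw [hqs] at h; simp at h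
    · rw [if_neg hg]
      push Not at hg
      obtain ⟨hlen, hall⟩ := hg
      simp only [ne_eq, Bool.not_eq_false] at hall
      simp only [List.length_cons] at hlen
      have hdig : ∀ x ∈ (p :: ps).flatten, PySem.Chars.isdigit x = true := by
        intro x hx
        rw [List.mem_flatten] at hx
        obtain ⟨r, hr, hxr⟩ := hx
        have hsd := List.all_eq_true.mp hall r hr
        simp only [PySem.Chars.strIsdigit, Bool.and_eq_true, List.all_eq_true] at hsd
        exact hsd.2 x hxr
      have hC : pvC (p :: ps) 1 0 0 true
          = (decide ((((p :: ps).flatten.length) : Int) = 13) &&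
             decide (PySem.Int.mod (pvWsum (p :: ps).flatten 0) 10 = 0)) := by
        have hp := List.all_eq_true.mp hall p (by simp)
        simp only [PySem.Chars.strIsdigit, Bool.and_eq_true] at hp
        have hpne : p ≠ [] := by
          intro h; rw [h] at hp; simpa using hp.1
        have hps : ps.all PySem.Chars.strIsdigit = true := by
          simp only [List.all_cons, Bool.and_eq_true] at hall
          exact hall.2
        simp only [pvC, hp.2, hps, Bool.true_and, zero_add,
          decide_eq_true (show (1:Int) + (1 + (ps.length : Int)) = 6 by omega),
          decide_eq_true (show p ≠ [] ∨ (true = false) from Or.inl hpne)]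
      rw [pvJoin_nil_eq_flatten, hC]
      set ds := (p :: ps).flatten with hds
      by_cases hlen13 : ds.length = 13
      · rw [if_neg (by omega)]
        rw [decide_eq_true (by exact_mod_cast hlen13 : ((ds.length : Int)) = 13),
          Bool.true_and]
        have hsplit : ds = ds.take 12 ++ ds.drop 12 := (List.take_append_drop 12 ds).symm
        have hlt : (ds.take 12).length = 12 := by simp [List.length_take, hlen13]
        have hld : (ds.drop 12).length = 1 := by simp [List.length_drop, hlen13]
        obtain ⟨c, hc⟩ : ∃ c, ds.drop 12 = [c] := by
          match h' : ds.drop 12 with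
          | [c] => exact ⟨c, rfl⟩
          | [] => rw [h'] at hld; simp at hld
          | _ :: _ :: _ => rw [h'] at hld; simp at hld
        rw [PySem.List.slice_to ds (by norm_num)]
        have h12 : ((12:Int)).toNat = 12 := rfl
        rw [h12]
        simp only [pvAFold, PySem.List.pyGetD_ofNat']
        have hget : ds.getD 12 '0' = c := by
          conv_lhs => rw [hsplit, hc]
          rw [List.getD_append_right _ _ _ _ (by omega)]
          simp [hlt]
        have htot : pvWsum ds 0 = pvWsum (ds.take 12) 0 + pvDigitVal c := by
          conv_lhs => rw [hsplit, hc]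
          rw [pvWsum_append]
          have h1 : pvWsum [c] (0 + ((ds.take 12).length : Int)) = pvDigitVal c := by
            rw [hlt]
            simp only [pvWsum]
            norm_num
          rw [h1]
        have hS : 0 ≤ pvWsum (ds.take 12) 0 :=
          pvWsum_nonneg _ _ (fun x hx => hdig x (List.mem_of_mem_take hx))
        have hcb := pvDigit_bounds c (hdig c (by rw [hsplit, hc]; simp))
        rw [hget, htot]
        rw [decide_eq_decide]
        have hmod : ∀ a : Int, PySem.Int.mod a 10 = a % 10 := by
          intro a; simp [PySem.Int.mod, Int.fmod_eq_emod]
        rw [hmod, hmod, hmod]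
        omega
      · rw [if_pos (by omega)]
        rw [decide_eq_false (by intro hh; exact hlen13 (by exact_mod_cast hh))]
        simp

-- ===== VERDICT (by name: the statement is the Claim_ definition above) =====
theorem check_isbn_spec : Claim_equal_check_isbn := by
  intro isbn _
  simp only [Spec_check_isbn, check_isbn, check_isbn_alt]
  by_cases h : PySem.Chars.startswith (PySem.Chars.upper (PySem.Chars.strip isbn.toList))
      "ISBN".toList = true
  · rw [if_pos h, if_pos ((pvPrefix_eq _).mp h)]
    rw [pvScan_eq_C, ← pvSplitOn_eq_sos]
    exact pvA_eq_C _
  · rw [if_neg h, if_neg (fun hh => h ((pvPrefix_eq _).mpr hh))]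
    rw [pvScan_eq_C, ← pvSplitOn_eq_sos]
    exact pvA_eq_C _
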